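-- pv_equiv track=rewrite | github.com/NortySpock/word-trimmer | test.py | find_subword
-- ===== SOURCE A (Python) =====
-- def find_subword(start_word, existing_list, dictionary_in):
--   word_subset = []
--   start_word
--   for i in range(len(start_word)):
--     word_subset.append(str(start_word[:i] + start_word[i+1:]))
--
--   for i in word_subset:
--     if i in dictionary_in:
--       if (find_subword(i,existing_list,dictionary_in) is not None or len(i) == 1):
--          existing_list.append(i)
--          return existing_list
--
--   return None
-- ===== SOURCE B (Python) =====
-- # Memoized DP over distinct subwords with a set for dictionary lookup, instead of
-- # A's naive exponential recursion. Like A, mutates existing_list (extends it) on success;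
-- # return value identical to A's.
-- def find_subword(start_word, existing_list, dictionary_in):
--     dict_set = set(dictionary_in)
--     memo = {}
--
--     def solve(w):
--         if w in memo:
--             return memo[w]
--         res = None
--         for i in range(len(w)):
--             s = w[:i] + w[i+1:]
--             if s in dict_set:
--                 if len(s) == 1:
--                     res = [s]
--                     break
--                 sub = solve(s)
--                 if sub is not None:
--                     res = sub + [s]
--                     break
--         memo[w] = res
--         return res
--
--     r = solve(start_word)
--     if r is None:
--         return None
--     existing_list.extend(r)
--     return existing_list
-- ===== Notes on version B (the rewrite author's own statement) =====
-- stated objective: faster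
-- what changed: Replaces A's naive exponential recursion (which re-explores the same subwords repeatedly and scans the dictionary list for membership) with a memoized DP over distinct subwords plus a set for O(1) dictionary lookup; both mutate existing_list identically and return the same value.
import Mathlib
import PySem

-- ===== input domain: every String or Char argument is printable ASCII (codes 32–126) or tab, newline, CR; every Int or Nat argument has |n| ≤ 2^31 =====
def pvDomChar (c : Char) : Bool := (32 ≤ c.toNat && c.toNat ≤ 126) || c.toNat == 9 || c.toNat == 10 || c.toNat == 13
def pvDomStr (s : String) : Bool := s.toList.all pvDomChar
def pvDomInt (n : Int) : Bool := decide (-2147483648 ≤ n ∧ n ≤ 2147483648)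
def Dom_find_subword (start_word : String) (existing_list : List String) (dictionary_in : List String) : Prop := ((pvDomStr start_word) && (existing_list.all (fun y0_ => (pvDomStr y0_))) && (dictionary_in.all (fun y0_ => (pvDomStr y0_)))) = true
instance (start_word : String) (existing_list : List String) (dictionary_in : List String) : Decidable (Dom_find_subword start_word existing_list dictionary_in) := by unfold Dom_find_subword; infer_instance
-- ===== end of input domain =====

-- B replaces A's naive exponential recursion by a memoized DP over distinct subwords with a
-- set for dictionary lookup; both Pythons mutate existing_list identically on success (append
-- the found chain), and the equivalence proved here is about the RETURN value.

-- len(w): a Python string length is a nonnegative int, kept as Nat (exact) for range and fuel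
def pyLen (w : String) : Nat := w.toList.length

-- start_word[:i] + start_word[i+1:] — the concatenation is done on the char lists (exact;
-- Lean's own String.append is kernel-opaque)
def pyDelete (w : String) (i : Nat) : String :=
  String.ofList ((PySem.Str.slice w none (some (i : Int))).toList ++
                 (PySem.Str.slice w (some ((i : Int) + 1)) none).toList)

-- ===== PORT A =====
-- the first loop of A: word_subset built by append
def word_subsetA (w : String) : List String :=
  (List.range (pyLen w)).foldl (fun acc i => acc ++ [pyDelete w i]) []

-- A's recursion, mutual with its second for-loop; the Nat fuel (always word length + 1 on the
-- actual call tree) is only a totality device.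
mutual
def findA : Nat → String → List String → List String → Option (List String)
  | 0, _, _, _ => none
  | Nat.succ n, w, existing, dict => loopA n (word_subsetA w) existing dict
termination_by n _ _ _ => (n, 0)

def loopA : Nat → List String → List String → List String → Option (List String)
  | _, [], _, _ => none
  | n, i :: rest, existing, dict =>
    if i ∈ dict then
      match findA n i existing dict with
      | some l => some (l ++ [i])                -- recursion succeeded: existing is now l; append i
      | none =>
        if pyLen i == 1 then some (existing ++ [i])
        else loopA n rest existing dict
    else loopA n rest existing dict
termination_by n ss _ _ => (n, ss.length + 1)
end

def find_subword (start_word : String) (existing_list : List String) (dictionary_in : List String) : Option (List String) :=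
  findA (pyLen start_word + 1) start_word existing_list dictionary_in

-- ===== PORT B =====
-- B's inner solve(w) with its memo dict, mutual with its for-loop over the one-deletion
-- subwords of w; same fuel device (always word length + 1 on the actual call tree).
mutual
def solveB : Nat → String → List String → PySem.Dict String (Option (List String)) →
    Option (List String) × PySem.Dict String (Option (List String))
  | 0, _, _, memo => (none, memo)
  | Nat.succ n, w, ds, memo =>
    match PySem.Dict.get? memo w with
    | some r => (r, memo)
    | none =>
      let p := loopB n ((List.range (pyLen w)).map (pyDelete w)) ds memo
      (p.1, PySem.Dict.insert p.2 w p.1)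
termination_by n _ _ _ => (n, 0)

def loopB : Nat → List String → List String → PySem.Dict String (Option (List String)) →
    Option (List String) × PySem.Dict String (Option (List String))
  | _, [], _, memo => (none, memo)
  | n, s :: rest, ds, memo =>
    if s ∈ ds then
      if pyLen s == 1 then (some [s], memo)
      else
        match solveB n s ds memo with
        | (some l, memo') => (some (l ++ [s]), memo')
        | (none, memo') => loopB n rest ds memo'
    else loopB n rest ds memo
termination_by n ss _ _ => (n, ss.length + 1)
end

def find_subword_alt (start_word : String) (existing_list : List String) (dictionary_in : List String) : Option (List String) :=
  let dict_set : PySem.Set String := PySem.Set.ofList dictionary_in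
  match (solveB (pyLen start_word + 1) start_word dict_set PySem.Dict.empty).1 with
  | none => none
  | some r => some (existing_list ++ r)

-- ===== PRECONDITION & SPEC =====
def Spec_find_subword (start_word : String) (existing_list : List String) (dictionary_in : List String) (out : Option (List String)) : Prop := out = find_subword_alt start_word existing_list dictionary_in
instance (start_word : String) (existing_list : List String) (dictionary_in : List String) (out : Option (List String)) : Decidable (Spec_find_subword start_word existing_list dictionary_in out) := by unfold Spec_find_subword; infer_instance

-- ===== CLAIM (what is proved, stated in full; the proofs are below) =====
def Claim_equal_find_subword : Prop := ∀ (start_word : String) (existing_list : List String) (dictionary_in : List String), Dom_find_subword start_word existing_list dictionary_in → Spec_find_subword start_word existing_list dictionary_in (find_subword start_word existing_list dictionary_in)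

-- ===== LEMMAS AND PROOFS =====

-- the pure chain of a word: A's recursion from an empty existing list, at its canonical fuel
def chainC (w : String) (dict : List String) : Option (List String) :=
  findA (pyLen w + 1) w [] dict

-- memo invariant for B: every stored value is the pure chain of its key
def GoodMemo (dict : List String) (memo : PySem.Dict String (Option (List String))) : Prop :=
  ∀ k r, PySem.Dict.get? memo k = some r → r = chainC k dict

lemma word_subsetA_eq_map (w : String) :
    word_subsetA w = (List.range (pyLen w)).map (pyDelete w) := by
  rw [word_subsetA, PySem.List.foldl_append_singleton_eq_map]
  simp

lemma toList_pyDelete (w : String) (i : Nat) :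
    (pyDelete w i).toList = w.toList.take i ++ w.toList.drop (i + 1) := by
  have h2 : (((i : Int) + 1)).toNat = i + 1 := by omega
  simp [pyDelete, PySem.Str.toList_slice, PySem.Chars.slice_eq_listSlice,
    PySem.List.slice_to w.toList (b := (i : Int)) (by omega),
    PySem.List.slice_from w.toList (a := (i : Int) + 1) (by omega), h2]

lemma len_pyDelete (w : String) (i : Nat) (hi : i < pyLen w) :
    pyLen (pyDelete w i) + 1 = pyLen w := by
  unfold pyLen at *
  rw [toList_pyDelete, List.length_append, List.length_take, List.length_drop]
  omega

-- the existing list only prefixes the result: A's appends are exactly the pure chain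
lemma findA_factor : ∀ n w (e dict : List String),
    findA n w e dict = (findA n w [] dict).map (fun l => e ++ l) := by
  intro n
  induction n with
  | zero => intro w e dict; simp [findA]
  | succ n ih =>
    intro w e dict
    rw [findA, findA]
    generalize word_subsetA w = ss
    induction ss with
    | nil => simp [loopA]
    | cons i rest ihr =>
      rw [loopA, loopA]
      by_cases hmem : i ∈ dict
      · simp only [if_pos hmem]
        rw [ih i e dict]
        cases h : findA n i [] dict with
        | some l => simp
        | none =>
          simp only [Option.map_none]
          by_cases h1 : pyLen i == 1
          · simp [h1]
          · simp only [h1, Bool.false_eq_true, if_neg, not_false_iff]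
            exact ihr
      · simp only [if_neg hmem]; exact ihr

-- a word of length 1 has no chain (its only subword is "", never of length 1)
lemma chainC_len_one (s : String) (dict : List String) (h : pyLen s = 1) :
    chainC s dict = none := by
  have hsub : word_subsetA s = [pyDelete s 0] := by
    rw [word_subsetA_eq_map, h]; simp
  have hlen : pyLen (pyDelete s 0) = 0 := by
    have := len_pyDelete s 0 (by omega)
    omega
  have hsub0 : word_subsetA (pyDelete s 0) = [] := by
    rw [word_subsetA_eq_map, hlen]; simp
  rw [chainC, h]
  rw [findA, hsub, loopA]
  by_cases hm : pyDelete s 0 ∈ dict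
  · simp only [if_pos hm]
    rw [findA, hsub0, loopA]
    simp [hlen, loopA]
  · simp [hm, loopA]

-- core correspondence: with a good memo and exact fuel, B's solve returns the pure chain
-- and preserves the invariant
lemma solveB_correct (dict : List String) : ∀ n w memo,
    n = pyLen w + 1 → GoodMemo dict memo →
    (solveB n w (PySem.Set.ofList dict) memo).1 = chainC w dict ∧
    GoodMemo dict (solveB n w (PySem.Set.ofList dict) memo).2 := by
  intro n
  induction n using Nat.strong_induction_on with
  | _ n ih =>
    intro w memo hn hg
    subst hn
    rw [solveB]
    cases hget : PySem.Dict.get? memo w with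
    | some r =>
      simp only []
      exact ⟨hg w r hget, hg⟩
    | none =>
      simp only []
      -- the loop over the subwords of w, all of length (pyLen w) - 1, fuel pyLen w
      have hloop : ∀ ss memo',
          (∀ s ∈ ss, pyLen s + 1 = pyLen w) → GoodMemo dict memo' →
          (loopB (pyLen w) ss (PySem.Set.ofList dict) memo').1 =
            loopA (pyLen w) ss [] dict ∧
          GoodMemo dict (loopB (pyLen w) ss (PySem.Set.ofList dict) memo').2 := by
        intro ss
        induction ss with
        | nil => intro memo' _ hg'; exact ⟨by simp [loopB, loopA], by simpa [loopB] using hg'⟩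
        | cons s rest ihr =>
          intro memo' hlen hg'
          have hslen : pyLen s + 1 = pyLen w := hlen s (by simp)
          have hrest : ∀ t ∈ rest, pyLen t + 1 = pyLen w := by
            intro t ht; exact hlen t (by simp [ht])
          rw [loopB, loopA]
          by_cases hmem : s ∈ dict
          · have hmem' : s ∈ PySem.Set.ofList dict := (PySem.Set.mem_ofList _ _).mpr hmem
            simp only [if_pos hmem, if_pos hmem']
            by_cases h1 : pyLen s == 1
            · -- length-1 subword: A's recursion returns none there, then takes the len==1 branch
              have h1' : pyLen s = 1 := by simpa using h1
              have hA : findA (pyLen w) s [] dict = none := by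
                have hw : pyLen w = pyLen s + 1 := hslen.symm
                rw [hw, ← chainC]
                exact chainC_len_one s dict h1'
              rw [hA]
              exact ⟨by simp [h1], by simpa [h1] using hg'⟩
            · -- longer subword: B's memoized solve computes exactly A's recursive call
              have hfuel : pyLen w = pyLen s + 1 := hslen.symm
              have hlt : pyLen s + 1 < pyLen w + 1 := by omega
              have hrec := ih (pyLen s + 1) hlt s memo' rfl hg'
              have hA : findA (pyLen w) s [] dict = chainC s dict := by
                rw [hfuel, ← chainC]
              cases hres : solveB (pyLen s + 1) s (PySem.Set.ofList dict) memo' with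
              | mk r memo'' =>
                have hr : r = chainC s dict := by rw [← hrec.1, hres]
                have hg'' : GoodMemo dict memo'' := by
                  have h2 := hrec.2; rw [hres] at h2; exact h2
                rw [hfuel] at hA ⊢
                rw [hres, hA]
                cases hc : chainC s dict with
                | some l => rw [hr, hc]; exact ⟨by simp [h1], by simpa [h1] using hg''⟩
                | none =>
                  rw [hr, hc]
                  simp only [h1, Bool.false_eq_true, if_neg, not_false_iff]
                  rw [← hfuel]
                  exact ihr memo'' hrest hg''
          · have hmem' : s ∉ PySem.Set.ofList dict := fun h => hmem ((PySem.Set.mem_ofList _ _).mp h)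
            simp only [if_neg hmem, if_neg hmem']
            exact ihr memo' hrest hg'
      have hsub : ∀ s ∈ (List.range (pyLen w)).map (pyDelete w), pyLen s + 1 = pyLen w := by
        intro s hs
        rcases List.mem_map.mp hs with ⟨i, hi, rfl⟩
        exact len_pyDelete w i (List.mem_range.mp hi)
      have h := hloop ((List.range (pyLen w)).map (pyDelete w)) memo hsub hg
      constructor
      · rw [h.1, chainC, findA, word_subsetA_eq_map]
      · intro k r hkr
        by_cases hkw : k = w
        · subst hkw
          rw [PySem.Dict.get?_insert_self] at hkr
          cases hkr
          rw [h.1, chainC, findA, word_subsetA_eq_map]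
        · rw [PySem.Dict.get?_insert_of_ne _ _ hkw] at hkr
          exact h.2 k r hkr

-- ===== VERDICT (by name: the statement is the Claim_ definition above) =====
theorem find_subword_spec : Claim_equal_find_subword := by
  intro w e dict _
  unfold Spec_find_subword find_subword
  have hempty : GoodMemo dict PySem.Dict.empty := by
    intro k r h; rw [PySem.Dict.get?_empty] at h; cases h
  have hB := (solveB_correct dict (pyLen w + 1) w PySem.Dict.empty rfl hempty).1
  rw [findA_factor, ← chainC]
  cases hc : (solveB (pyLen w + 1) w (PySem.Set.ofList dict) PySem.Dict.empty).1 with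
  | none =>
    have hcc : chainC w dict = none := by rw [← hB, hc]
    simp [find_subword_alt, hc, hcc]
  | some r =>
    have hcc : chainC w dict = some r := by rw [← hB, hc]
    simp [find_subword_alt, hc, hcc]
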